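-- pv_equiv track=rewrite | github.com/ariel8sche/ComputerScience | intro/python/guia8.py | ultimosMovimientos
-- ===== SOURCE A (Python) =====
-- def ultimosMovimientos(movimientos:list)->str:
--     saldo = 0
--     for movimiento in movimientos:
--         if movimiento[0] == "I":
--             saldo = saldo + movimiento[1]
--         elif movimiento[0] == "R":
--             saldo = saldo - movimiento[1]
--     return saldo
-- ===== SOURCE B (Python) =====
-- def ultimosMovimientos(movimientos: list) -> str:
--     total_in = sum(m[1] for m in movimientos if m[0] == "I")
--     total_out = sum(m[1] for m in movimientos if m[0] == "R")
--     return total_in - total_out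
-- ===== Notes on version B (the rewrite author's own statement) =====
-- stated objective: simpler
-- what changed: Replaces the single running-balance loop with a signed branch by two independent filtered sums (deposits and withdrawals) and returns their difference.
import Mathlib
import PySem

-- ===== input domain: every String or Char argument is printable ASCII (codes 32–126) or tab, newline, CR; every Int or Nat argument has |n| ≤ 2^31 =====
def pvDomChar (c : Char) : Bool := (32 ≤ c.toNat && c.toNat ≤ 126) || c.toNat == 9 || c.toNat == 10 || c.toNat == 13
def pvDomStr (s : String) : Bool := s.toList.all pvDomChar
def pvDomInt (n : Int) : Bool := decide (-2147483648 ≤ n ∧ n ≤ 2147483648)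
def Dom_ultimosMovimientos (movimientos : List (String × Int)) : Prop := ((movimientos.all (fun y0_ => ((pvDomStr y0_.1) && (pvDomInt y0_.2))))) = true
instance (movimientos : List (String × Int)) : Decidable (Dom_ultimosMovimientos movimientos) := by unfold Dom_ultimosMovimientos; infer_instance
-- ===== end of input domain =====

-- B computes the deposit and withdrawal totals as two independent filtered sums and returns their difference (simpler decomposition; same return value).

-- ===== PORT A =====
-- running-balance fold over the movements, branching on the movement type
def ultimosMovimientos (movimientos : List (String × Int)) : Int :=
  movimientos.foldl (fun saldo movimiento =>
    if movimiento.1 = "I" then saldo + movimiento.2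
    else if movimiento.1 = "R" then saldo - movimiento.2
    else saldo) 0

-- ===== PORT B =====
-- two filtered sums, then a subtraction
def ultimosMovimientos_alt (movimientos : List (String × Int)) : Int :=
  ((movimientos.filter (fun m => m.1 = "I")).map (fun m => m.2)).sum
  - ((movimientos.filter (fun m => m.1 = "R")).map (fun m => m.2)).sum

-- ===== PRECONDITION & SPEC =====
def Spec_ultimosMovimientos (movimientos : List (String × Int)) (out : Int) : Prop := out = ultimosMovimientos_alt movimientos
instance (movimientos : List (String × Int)) (out : Int) : Decidable (Spec_ultimosMovimientos movimientos out) := by unfold Spec_ultimosMovimientos; infer_instance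

-- ===== CLAIM (what is proved, stated in full; the proofs are below) =====
def Claim_equal_ultimosMovimientos : Prop := ∀ (movimientos : List (String × Int)), Dom_ultimosMovimientos movimientos → Spec_ultimosMovimientos movimientos (ultimosMovimientos movimientos)

-- ===== LEMMAS AND PROOFS =====
theorem ultimosMovimientos_fold (movimientos : List (String × Int)) (a : Int) :
    movimientos.foldl (fun saldo movimiento =>
      if movimiento.1 = "I" then saldo + movimiento.2
      else if movimiento.1 = "R" then saldo - movimiento.2
      else saldo) a = a + ultimosMovimientos_alt movimientos := by
  induction movimientos generalizing a with
  | nil => simp [ultimosMovimientos_alt]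
  | cons m ms ih =>
    simp only [List.foldl_cons, ih, ultimosMovimientos_alt, List.filter_cons]
    rcases eq_or_ne m.1 "I" with h1 | h1
    · simp [h1]; ring
    · rcases eq_or_ne m.1 "R" with h2 | h2
      · simp [h1, h2]; ring
      · simp [h1, h2]

theorem ultimosMovimientos_eq (movimientos : List (String × Int)) :
    ultimosMovimientos movimientos = ultimosMovimientos_alt movimientos := by
  unfold ultimosMovimientos
  rw [ultimosMovimientos_fold]
  ring

-- ===== VERDICT (by name: the statement is the Claim_ definition above) =====
theorem ultimosMovimientos_spec : Claim_equal_ultimosMovimientos := by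
  intro movimientos _
  exact ultimosMovimientos_eq movimientos
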